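-- pv_equiv track=rewrite | github.com/yuyash/visionmate | src/visionmate/core/recognition/openai_compatible.py | _extract_supplementary
-- ===== SOURCE A (Python) =====
-- def _extract_supplementary(content: str) -> str:
--     """Extract supplementary information from response content.
--
--     Args:
--         content: Response content text
--
--     Returns:
--         Supplementary information
--     """
--     markers = ["Supplementary information:", "Supplementary:", "Additional context:"]
--
--     for marker in markers:
--         if marker in content:
--             lines = content.split("\n")
--             for i, line in enumerate(lines):
--                 if marker in line:
--                     # Collect remaining lines
--                     supplementary_lines = []
--                     for j in range(i + 1, len(lines)):
--                         supplementary_lines.append(lines[j])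
--                     if supplementary_lines:
--                         return "\n".join(supplementary_lines).strip()
--                     # Or the rest of the line
--                     return line.split(marker, 1)[1].strip()
--
--     return ""
-- ===== SOURCE B (Python) =====
-- def _extract_supplementary(content: str) -> str:
--     """Extract supplementary information from response content."""
--     for marker in ("Supplementary information:", "Supplementary:", "Additional context:"):
--         idx = content.find(marker)
--         if idx == -1:
--             continue
--         tail = content[idx + len(marker):]
--         nl = tail.find("\n")
--         return (tail if nl == -1 else tail[nl + 1:]).strip()
--     return ""
-- ===== Notes on version B (the rewrite author's own statement) =====
-- stated objective: simpler
-- what changed: B drops A's split-into-lines list and nested line/collect loops: for each marker it uses str.find index arithmetic and slicing (first occurrence, then the first newline after it) to take either the rest of the marker's line or everything after that line, stripped.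
import Mathlib
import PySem

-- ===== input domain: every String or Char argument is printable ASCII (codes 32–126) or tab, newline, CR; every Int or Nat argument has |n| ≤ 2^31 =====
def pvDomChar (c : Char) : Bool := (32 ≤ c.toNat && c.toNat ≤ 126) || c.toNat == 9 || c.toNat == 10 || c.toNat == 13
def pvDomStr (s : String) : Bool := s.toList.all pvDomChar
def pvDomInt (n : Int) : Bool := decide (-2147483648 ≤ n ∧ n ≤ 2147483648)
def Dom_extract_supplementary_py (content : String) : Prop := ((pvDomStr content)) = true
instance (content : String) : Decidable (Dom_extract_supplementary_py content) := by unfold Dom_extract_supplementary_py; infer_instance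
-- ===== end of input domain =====

-- B replaces A's split-into-lines + nested line scans by direct index arithmetic with str.find and slicing (objective: simpler).


-- ===== PORT A =====
-- inner 'for i, line in enumerate(lines)' loop; `some r` = a `return r`, `none` = the loop fell through
def pvLineLoop (m : List Char) : List (List Char) → Option (List Char)
  | [] => none
  | line :: rest =>
    if PySem.Chars.isIn m line then
      -- the j-loop collects lines[i+1:], which is exactly `rest`
      some (if rest.isEmpty = false then PySem.Chars.strip (PySem.Chars.join ['\n'] rest)
            else PySem.Chars.strip ((PySem.Chars.splitOnMax line m 1).getD 1 []))
    else pvLineLoop m rest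

-- outer 'for marker in markers' loop
def pvAGo (content : List Char) : List (List Char) → List Char
  | [] => []
  | m :: ms =>
    if PySem.Chars.isIn m content then
      match pvLineLoop m (PySem.Chars.splitOn content ['\n']) with
      | some r => r
      | none => pvAGo content ms
    else pvAGo content ms

def extract_supplementary_py (content : String) : String :=
  String.ofList (pvAGo content.toList
    ["Supplementary information:".toList, "Supplementary:".toList, "Additional context:".toList])

-- ===== PORT B =====
-- one marker of B's loop body: `none` = the `continue`
def pvBTry (content m : List Char) : Option (List Char) :=
  let idx := PySem.Chars.find content m
  if idx = -1 then none
  else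
    let tail := PySem.List.slice content (some (idx + m.length))
    let nl := PySem.Chars.find tail ['\n']
    some (PySem.Chars.strip (if nl = -1 then tail else PySem.List.slice tail (some (nl + 1))))

def pvBGo (content : List Char) : List (List Char) → List Char
  | [] => []
  | m :: ms =>
    match pvBTry content m with
    | some r => r
    | none => pvBGo content ms

def extract_supplementary_py_alt (content : String) : String :=
  String.ofList (pvBGo content.toList
    ["Supplementary information:".toList, "Supplementary:".toList, "Additional context:".toList])

-- ===== PRECONDITION & SPEC =====
def Spec_extract_supplementary_py (content : String) (out : String) : Prop := out = extract_supplementary_py_alt content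
instance (content : String) (out : String) : Decidable (Spec_extract_supplementary_py content out) := by unfold Spec_extract_supplementary_py; infer_instance

-- ===== CLAIM (what is proved, stated in full; the proofs are below) =====
def Claim_equal_extract_supplementary_py : Prop := ∀ (content : String), Dom_extract_supplementary_py content → Spec_extract_supplementary_py content (extract_supplementary_py content)

-- ===== LEMMAS AND PROOFS =====

-- clean recursion computing content.split("\n")
def pvSplitNl : List Char → List (List Char)
  | [] => [[]]
  | c :: rest =>
    if c = '\n' then [] :: pvSplitNl rest
    else
      match pvSplitNl rest with
      | h :: t => (c :: h) :: t
      | [] => [[c]]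

lemma pvSplitNl_ne_nil (s : List Char) : pvSplitNl s ≠ [] := by
  induction s with
  | nil => simp [pvSplitNl]
  | cons c rest ih =>
    simp only [pvSplitNl]
    split
    · simp
    · rcases h : pvSplitNl rest with _ | ⟨a, t⟩ <;> simp

lemma pvSplitNl_no_nl (s : List Char) (h : '\n' ∉ s) : pvSplitNl s = [s] := by
  induction s with
  | nil => rfl
  | cons c rest ih =>
    simp only [List.mem_cons, not_or] at h
    rw [pvSplitNl, if_neg (fun hc => h.1 hc.symm), ih h.2]

lemma pvSplitNl_append (l₀ s' : List Char) (h : '\n' ∉ l₀) :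
    pvSplitNl (l₀ ++ '\n' :: s') = l₀ :: pvSplitNl s' := by
  induction l₀ with
  | nil => simp [pvSplitNl]
  | cons c rest ih =>
    simp only [List.mem_cons, not_or] at h
    have := ih h.2
    simp only [List.cons_append, pvSplitNl, this]
    rw [if_neg (fun hc => h.1 hc.symm)]

lemma pvJoin_splitNl (s : List Char) : PySem.Chars.join ['\n'] (pvSplitNl s) = s := by
  induction s with
  | nil => simp [pvSplitNl, PySem.Chars.join_singleton]
  | cons c rest ih =>
    simp only [pvSplitNl]
    rcases h : pvSplitNl rest with _ | ⟨a, t⟩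
    · exact absurd h (pvSplitNl_ne_nil rest)
    · rw [h] at ih
      by_cases hc : c = '\n'
      · subst hc
        rw [if_pos rfl, PySem.Chars.join_cons_cons]
        simpa using ih
      · rw [if_neg hc]
        rcases t with _ | ⟨b, t'⟩
        · rw [PySem.Chars.join_singleton] at ih ⊢
          simp [ih]
        · rw [PySem.Chars.join_cons_cons] at ih ⊢
          simpa using ih

lemma pvSplitOn_go_eq (fuel : ℕ) (l cur : List Char) (acc : List (List Char)) (hf : l.length ≤ fuel) :
    PySem.Chars.splitOn.go ['\n'] fuel l cur acc
      = acc.reverse ++ (pvSplitNl l).modifyHead (cur.reverse ++ ·) := by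
  induction fuel generalizing l cur acc with
  | zero =>
    have : l = [] := List.length_eq_zero_iff.mp (Nat.le_zero.mp hf)
    subst this
    rw [PySem.Chars.splitOn.go]
    simp [pvSplitNl]
  | succ f ih =>
    cases l with
    | nil =>
      rw [PySem.Chars.splitOn.go]
      all_goals simp [pvSplitNl]
    | cons c rest =>
      rw [PySem.Chars.splitOn.go]
      simp only [List.length_cons, Nat.succ_le_succ_iff] at hf
      by_cases hc : c = '\n'
      · subst hc
        rw [if_pos (by simp)]
        have hd : List.drop (['\n'] : List Char).length ('\n' :: rest) = rest := rfl
        rw [hd, ih _ _ _ hf]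
        simp [pvSplitNl]
        cases pvSplitNl rest <;> simp
      · rw [if_neg (by simp [List.isPrefixOf_iff_prefix, List.cons_prefix_cons]; intro h; exact hc h.symm)]
        rw [ih _ _ _ hf]
        simp only [pvSplitNl, if_neg hc]
        rcases h : pvSplitNl rest with _ | ⟨a, t⟩
        · exact absurd h (pvSplitNl_ne_nil rest)
        · simp

lemma pvSplitOn_eq (s : List Char) : PySem.Chars.splitOn s ['\n'] = pvSplitNl s := by
  rw [PySem.Chars.splitOn, pvSplitOn_go_eq (s.length + 1) s [] [] (by omega)]
  cases h : pvSplitNl s with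
  | nil => exact absurd h (pvSplitNl_ne_nil s)
  | cons a t => simp

-- first occurrence is unique: identifies PySem.Chars.find
lemma pvPrefix_drop_infix (m w : List Char) (i : ℕ) (h : m <+: List.drop i w) : m <:+: w :=
  h.isInfix.trans (List.drop_suffix i w).isInfix

lemma pvFind_eq_of (s m : List Char) (k : ℕ) (hk : m <+: List.drop k s)
    (hmin : ∀ i < k, ¬ m <+: List.drop i s) : PySem.Chars.find s m = (k : Int) := by
  have hinf : m <:+: s := pvPrefix_drop_infix m s k hk
  have h0 : 0 ≤ PySem.Chars.find s m := (PySem.Chars.find_nonneg_iff s m).mpr hinf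
  obtain ⟨hp, hmn⟩ := PySem.Chars.find_spec (s := s) (sub := m) h0
  have hkk : (PySem.Chars.find s m).toNat = k := by
    rcases lt_trichotomy (PySem.Chars.find s m).toNat k with h | h | h
    · exact absurd hp (hmin _ h)
    · exact h
    · exact absurd hk (hmn k h)
  omega

-- an occurrence of a newline-free pattern cannot cross the first newline
lemma pvNo_cross' (m l₀ s' : List Char) (hn : '\n' ∉ m) (i : ℕ) (hi : i ≤ l₀.length)
    (hfit : ¬ m <+: List.drop i l₀) : ¬ m <+: List.drop i (l₀ ++ '\n' :: s') := by
  intro h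
  rw [List.drop_append_of_le_length hi] at h
  by_cases hl : m.length ≤ (List.drop i l₀).length
  · exact hfit ((List.isPrefix_append_of_length hl).mp h)
  · have hlt : (List.drop i l₀).length < m.length := lt_of_not_ge hl
    have hchr := h.getElem (i := (List.drop i l₀).length) hlt
    rw [List.getElem_append_right (le_refl _)] at hchr
    simp only [Nat.sub_self, List.getElem_cons_zero] at hchr
    exact hn (hchr ▸ List.getElem_mem hlt)

lemma pvNo_cross (m l₀ s' : List Char) (hn : '\n' ∉ m) (hno : ¬ m <:+: l₀) (i : ℕ)
    (hi : i ≤ l₀.length) : ¬ m <+: List.drop i (l₀ ++ '\n' :: s') :=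
  pvNo_cross' m l₀ s' hn i hi (fun h => hno (pvPrefix_drop_infix m l₀ i h))

lemma pvInfix_tail (m l₀ s' : List Char) (hn : '\n' ∉ m) (hno : ¬ m <:+: l₀)
    (hin : m <:+: l₀ ++ '\n' :: s') : m <:+: s' := by
  obtain ⟨j, hj⟩ := (PySem.Chars.exists_prefix_drop_iff_isIn m _).mpr
    ((PySem.Chars.isIn_iff_infix m _).mpr hin)
  by_cases hle : j ≤ l₀.length
  · exact absurd hj (pvNo_cross m l₀ s' hn hno j hle)
  · have : List.drop j (l₀ ++ '\n' :: s') = List.drop (j - (l₀.length + 1)) s' := by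
      rw [show l₀ ++ '\n' :: s' = (l₀ ++ ['\n']) ++ s' by simp, List.drop_append]
      rw [List.drop_eq_nil_of_le (by simp; omega)]
      simp
    rw [this] at hj
    exact pvPrefix_drop_infix m s' _ hj

-- after the single allowed split the remainder is taken whole
lemma pvSplitOnMax_go_zero (m : List Char) (f : ℕ) (l cur : List Char) (acc : List (List Char)) :
    PySem.Chars.splitOnMax.go m f 0 l cur acc = acc.reverse ++ [cur.reverse ++ l] := by
  cases f <;> cases l <;> (rw [PySem.Chars.splitOnMax.go]; all_goals simp)

lemma pvSplitOnMax_go_one (m : List Char) (hm : m ≠ []) :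
    ∀ (fuel : ℕ) (l : List Char), l.length ≤ fuel → m <:+: l → ∀ (cur : List Char) (acc : List (List Char)),
    ∃ k : ℕ, m <+: List.drop k l ∧ (∀ i < k, ¬ m <+: List.drop i l) ∧
      PySem.Chars.splitOnMax.go m fuel 1 l cur acc
        = acc.reverse ++ [cur.reverse ++ List.take k l, List.drop (k + m.length) l] := by
  intro fuel
  induction fuel with
  | zero =>
    intro l hf hin _ _
    have : l = [] := List.length_eq_zero_iff.mp (Nat.le_zero.mp hf)
    subst this
    exact absurd (List.infix_nil.mp hin) hm
  | succ f ih =>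
    intro l hf hin cur acc
    cases l with
    | nil => exact absurd (List.infix_nil.mp hin) hm
    | cons c rest =>
      rw [PySem.Chars.splitOnMax.go]
      simp only [List.length_cons, Nat.succ_le_succ_iff] at hf
      by_cases hp : m.isPrefixOf (c :: rest)
      · refine ⟨0, ?_, by omega, ?_⟩
        · simpa using List.isPrefixOf_iff_prefix.mp hp
        · rw [if_neg (by omega), if_pos hp, pvSplitOnMax_go_zero]
          simp
      · have hin' : m <:+: rest := by
          rcases List.infix_cons_iff.mp hin with h | h
          · exact absurd (List.isPrefixOf_iff_prefix.mpr h) hp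
          · exact h
        obtain ⟨k', hk', hmin', heq'⟩ := ih rest hf hin' (c :: cur) acc
        refine ⟨k' + 1, by simpa using hk', ?_, ?_⟩
        · intro i hi
          cases i with
          | zero =>
            intro h
            exact hp (List.isPrefixOf_iff_prefix.mpr (by simpa using h))
          | succ j =>
            simp only [List.drop_succ_cons]
            exact hmin' j (by omega)
        · rw [if_neg (by omega), if_neg hp, heq']
          simp only [List.take_succ_cons]
          have : (k' + 1 + m.length) = (k' + m.length) + 1 := by omega
          rw [this]
          simp

-- splitOnMax with maxsplit 1 splits at the first occurrence
lemma pvSplitOnMax_one (l m : List Char) (hm : m ≠ []) (hin : m <:+: l) :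
    PySem.Chars.splitOnMax l m 1
      = [List.take (PySem.Chars.find l m).toNat l,
         List.drop ((PySem.Chars.find l m).toNat + m.length) l] := by
  obtain ⟨k, hk, hmin, heq⟩ := pvSplitOnMax_go_one m hm (l.length + 1) l (by omega) hin [] []
  have hf : PySem.Chars.find l m = (k : Int) := pvFind_eq_of l m k hk hmin
  rw [PySem.Chars.splitOnMax, if_neg (by omega)]
  have h1 : (1 : Int).toNat = 1 := rfl
  rw [h1, heq, hf]
  simp

-- pvBTry with the first find already evaluated
lemma pvBTry_eq (s m : List Char) (k : ℕ) (hfind : PySem.Chars.find s m = (k : Int)) :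
    pvBTry s m = some (PySem.Chars.strip
      (if PySem.Chars.find (List.drop (k + m.length) s) ['\n'] = -1
       then List.drop (k + m.length) s
       else PySem.List.slice (List.drop (k + m.length) s)
         (some (PySem.Chars.find (List.drop (k + m.length) s) ['\n'] + 1)))) := by
  unfold pvBTry
  rw [hfind, if_neg (by omega)]
  have h2 : ((k : Int) + (m.length : Int)) = ((k + m.length : ℕ) : Int) := by push_cast; ring
  have h1 : PySem.List.slice s (some ((k : Int) + (m.length : Int))) = List.drop (k + m.length) s := by
    rw [h2, PySem.List.slice_from s (by omega), Int.toNat_natCast]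
  simp only [h1]

lemma pvFind_nl_none (t : List Char) (h : '\n' ∉ t) : PySem.Chars.find t ['\n'] = -1 :=
  (PySem.Chars.find_eq_neg_one_iff t _).mpr (fun hin => h ((List.singleton_infix_iff _ _).mp hin))

lemma pvFind_nl_append (u v : List Char) (h : '\n' ∉ u) :
    PySem.Chars.find (u ++ '\n' :: v) ['\n'] = (u.length : Int) := by
  apply pvFind_eq_of
  · rw [List.drop_left]
    exact ⟨v, rfl⟩
  · intro i hi hpre
    rw [List.drop_append_of_le_length (le_of_lt hi),
        List.drop_eq_getElem_cons (show i < u.length by omega), List.cons_append] at hpre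
    obtain ⟨he, -⟩ := List.cons_prefix_cons.mp hpre
    exact h (by rw [he]; exact List.getElem_mem _)

lemma pvFind_first_line (m l₀ s' : List Char) (hn : '\n' ∉ m) (hml : m <:+: l₀) :
    PySem.Chars.find (l₀ ++ '\n' :: s') m = PySem.Chars.find l₀ m := by
  have h0 : 0 ≤ PySem.Chars.find l₀ m := (PySem.Chars.find_nonneg_iff l₀ m).mpr hml
  obtain ⟨hp, hmin⟩ := PySem.Chars.find_spec (s := l₀) (sub := m) h0
  have hkle : (PySem.Chars.find l₀ m).toNat ≤ l₀.length := by
    have := PySem.Chars.find_le_length l₀ m; omega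
  have key : PySem.Chars.find (l₀ ++ '\n' :: s') m = ((PySem.Chars.find l₀ m).toNat : Int) := by
    apply pvFind_eq_of
    · rw [List.drop_append_of_le_length hkle]
      exact hp.trans (List.prefix_append _ _)
    · intro i hi
      exact pvNo_cross' m l₀ s' hn i (by omega) (hmin i hi)
  omega

lemma pvDrop_shift (l₀ s' : List Char) (j : ℕ) :
    List.drop (l₀.length + 1 + j) (l₀ ++ '\n' :: s') = List.drop j s' := by
  rw [show l₀ ++ '\n' :: s' = (l₀ ++ ['\n']) ++ s' by simp, List.drop_append,
      List.drop_eq_nil_of_le (by simp only [List.length_append, List.length_cons, List.length_nil]; omega)]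
  simp

-- the per-marker equivalence
lemma pvMain (m : List Char) (hm : m ≠ []) (hn : '\n' ∉ m) :
    ∀ s : List Char, m <:+: s → pvLineLoop m (pvSplitNl s) = pvBTry s m := by
  suffices H : ∀ n (s : List Char), s.length ≤ n → m <:+: s →
      pvLineLoop m (pvSplitNl s) = pvBTry s m from
    fun s hin => H s.length s (le_refl _) hin
  intro n
  induction n with
  | zero =>
    intro s hl hin
    have : s = [] := List.length_eq_zero_iff.mp (Nat.le_zero.mp hl)
    subst this
    exact absurd (List.infix_nil.mp hin) hm
  | succ n ih =>
    intro s hl hin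
    by_cases hnl : '\n' ∈ s
    · -- s = l₀ ++ '\n' :: t with '\n' ∉ l₀
      obtain ⟨t, ht⟩ : ∃ t, List.dropWhile (fun c => c != '\n') s = '\n' :: t := by
        cases hd : List.dropWhile (fun c => c != '\n') s with
        | nil =>
          have := List.dropWhile_eq_nil_iff.mp hd '\n' hnl
          simp at this
        | cons c t =>
          have hc := List.head_dropWhile_not (fun c => c != '\n') (l := s) (by rw [hd]; simp)
          simp only [hd, List.head_cons] at hc
          simp at hc
          exact ⟨t, by rw [hc]⟩
      set l₀ := List.takeWhile (fun c => c != '\n') s with hl₀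
      have hsplit : s = l₀ ++ '\n' :: t := by
        rw [hl₀, ← ht, List.takeWhile_append_dropWhile]
      have h0 : '\n' ∉ l₀ := by
        intro hmem
        have := List.mem_takeWhile_imp hmem
        simp at this
      have hlen : l₀.length + 1 + t.length = s.length := by
        rw [hsplit]; simp; omega
      rw [hsplit] at hin ⊢
      rw [pvSplitNl_append l₀ t h0]
      by_cases hml : m <:+: l₀
      · -- marker on this line, later lines exist
        have h0' : 0 ≤ PySem.Chars.find l₀ m := (PySem.Chars.find_nonneg_iff l₀ m).mpr hml
        obtain ⟨hp, hmin⟩ := PySem.Chars.find_spec (s := l₀) (sub := m) h0'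
        have hkle : (PySem.Chars.find l₀ m).toNat ≤ l₀.length := by
          have := PySem.Chars.find_le_length l₀ m; omega
        set k := (PySem.Chars.find l₀ m).toNat with hkdef
        have hkm : k + m.length ≤ l₀.length := by
          have := hp.length_le
          simp at this
          omega
        have hfind : PySem.Chars.find (l₀ ++ '\n' :: t) m = (k : Int) := by
          rw [pvFind_first_line m l₀ t hn hml]; omega
        rw [pvBTry_eq _ m k hfind]
        have htail : List.drop (k + m.length) (l₀ ++ '\n' :: t)
            = List.drop (k + m.length) l₀ ++ '\n' :: t := List.drop_append_of_le_length hkm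
        have hu : '\n' ∉ List.drop (k + m.length) l₀ := fun hx => h0 (List.mem_of_mem_drop hx)
        have hnlf : PySem.Chars.find (List.drop (k + m.length) (l₀ ++ '\n' :: t)) ['\n']
            = ((List.drop (k + m.length) l₀).length : Int) := by
          rw [htail]; exact pvFind_nl_append _ t hu
        rw [hnlf, if_neg (by omega)]
        have hslice : PySem.List.slice (List.drop (k + m.length) (l₀ ++ '\n' :: t))
            (some (((List.drop (k + m.length) l₀).length : Int) + 1)) = t := by
          rw [PySem.List.slice_from _ (by omega), htail]
          rw [show (((List.drop (k + m.length) l₀).length : Int) + 1).toNat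
              = (List.drop (k + m.length) l₀ ++ ['\n']).length by simp]
          rw [show List.drop (k + m.length) l₀ ++ '\n' :: t
              = (List.drop (k + m.length) l₀ ++ ['\n']) ++ t by simp]
          exact List.drop_left
        rw [hslice]
        -- A's side
        rw [pvLineLoop, if_pos ((PySem.Chars.isIn_iff_infix m l₀).mpr hml)]
        rw [if_pos (by simp [List.isEmpty_eq_false_iff, pvSplitNl_ne_nil t])]
        rw [pvJoin_splitNl t]
      · -- marker not on this line: both sides reduce to the tail t
        have hin' : m <:+: t := pvInfix_tail m l₀ t hn hml hin
        have hA : pvLineLoop m (l₀ :: pvSplitNl t) = pvLineLoop m (pvSplitNl t) := by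
          rw [pvLineLoop]
          rw [if_neg (by
            intro h
            exact hml ((PySem.Chars.isIn_iff_infix m l₀).mp h))]
        have h0' : 0 ≤ PySem.Chars.find t m := (PySem.Chars.find_nonneg_iff t m).mpr hin'
        obtain ⟨hp, hmin⟩ := PySem.Chars.find_spec (s := t) (sub := m) h0'
        set k' := (PySem.Chars.find t m).toNat with hk'def
        have hfind' : PySem.Chars.find t m = (k' : Int) := by omega
        have hfindS : PySem.Chars.find (l₀ ++ '\n' :: t) m = ((l₀.length + 1 + k' : ℕ) : Int) := by
          apply pvFind_eq_of
          · rw [pvDrop_shift]; exact hp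
          · intro i hi
            by_cases hile : i ≤ l₀.length
            · exact pvNo_cross m l₀ t hn hml i hile
            · rw [show i = l₀.length + 1 + (i - l₀.length - 1) by omega, pvDrop_shift]
              exact hmin _ (by omega)
        rw [hA, ih t (by omega) hin', pvBTry_eq _ m _ hfindS, pvBTry_eq t m k' hfind']
        rw [show l₀.length + 1 + k' + m.length = l₀.length + 1 + (k' + m.length) by omega,
            pvDrop_shift]
    · -- no newline: the marker line is the last line
      rw [pvSplitNl_no_nl s hnl]
      rw [pvLineLoop, if_pos ((PySem.Chars.isIn_iff_infix m s).mpr hin)]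
      simp only [List.isEmpty_nil]
      rw [if_neg (by simp)]
      rw [pvSplitOnMax_one s m hm hin]
      have h0' : 0 ≤ PySem.Chars.find s m := (PySem.Chars.find_nonneg_iff s m).mpr hin
      set k := (PySem.Chars.find s m).toNat with hkdef
      have hfind : PySem.Chars.find s m = (k : Int) := by omega
      rw [pvBTry_eq s m k hfind]
      have hnt : '\n' ∉ List.drop (k + m.length) s := fun hx => hnl (List.mem_of_mem_drop hx)
      rw [pvFind_nl_none _ hnt, if_pos rfl]
      rfl

lemma pvGo_eq (s : List Char) (ms : List (List Char)) (h : ∀ m ∈ ms, m ≠ [] ∧ '\n' ∉ m) :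
    pvAGo s ms = pvBGo s ms := by
  induction ms with
  | nil => rfl
  | cons m ms ih =>
    obtain ⟨hm, hn⟩ := h m (by simp)
    have ih' := ih (fun m' hm' => h m' (List.mem_cons_of_mem _ hm'))
    by_cases hin : m <:+: s
    · have hA : pvAGo s (m :: ms)
          = match pvLineLoop m (PySem.Chars.splitOn s ['\n']) with
            | some r => r
            | none => pvAGo s ms := by
        rw [pvAGo, if_pos ((PySem.Chars.isIn_iff_infix m s).mpr hin)]
      rw [hA, pvSplitOn_eq, pvMain m hm hn s hin, pvBGo]
      cases hB : pvBTry s m <;> simp [ih']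
    · have hfalse : PySem.Chars.isIn m s = false := by
        cases hI : PySem.Chars.isIn m s
        · rfl
        · exact absurd ((PySem.Chars.isIn_iff_infix m s).mp hI) hin
      have hBnone : pvBTry s m = none := by
        unfold pvBTry
        rw [(PySem.Chars.find_eq_neg_one_iff s m).mpr hin, if_pos rfl]
      rw [pvAGo, hfalse, pvBGo, hBnone]
      simpa using ih'

-- ===== VERDICT (by name: the statement is the Claim_ definition above) =====
theorem extract_supplementary_py_spec : Claim_equal_extract_supplementary_py := by
  intro content _
  unfold Spec_extract_supplementary_py extract_supplementary_py extract_supplementary_py_alt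
  rw [pvGo_eq]
  intro m hm
  fin_cases hm <;> exact ⟨by decide, by decide⟩
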